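-- pv_equiv track=rewrite | github.com/giomartinsdev/leet-codes | src/8-String-to-Integer-(atoi)/challenge.py | remove_letters
-- ===== SOURCE A (Python) =====
-- def remove_letters(string: str) -> str:
--     if not string:
--         return ""
--
--     result = ""
--     i = 0
--
--     if string[0] in ['+', '-']:
--         result += string[0]
--         i = 1
--
--     while i < len(string) and string[i].isdigit():
--         result += string[i]
--         i += 1
--
--     return result
-- ===== SOURCE B (Python) =====
-- def remove_letters(string: str) -> str:
--     sign = string[:1] if string[:1] in ('+', '-') else ''
--     rest = string[len(sign):]
--     cut = next((i for i, c in enumerate(rest) if not c.isdigit()), len(rest))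
--     return sign + rest[:cut]
-- ===== Notes on version B (the rewrite author's own statement) =====
-- stated objective: idiomatic
-- what changed: Replaced the explicit index/while-loop with string accumulator by slice-based sign peeling plus computing the first non-digit index with next() over an enumerate generator and slicing the digit prefix.
import Mathlib
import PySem

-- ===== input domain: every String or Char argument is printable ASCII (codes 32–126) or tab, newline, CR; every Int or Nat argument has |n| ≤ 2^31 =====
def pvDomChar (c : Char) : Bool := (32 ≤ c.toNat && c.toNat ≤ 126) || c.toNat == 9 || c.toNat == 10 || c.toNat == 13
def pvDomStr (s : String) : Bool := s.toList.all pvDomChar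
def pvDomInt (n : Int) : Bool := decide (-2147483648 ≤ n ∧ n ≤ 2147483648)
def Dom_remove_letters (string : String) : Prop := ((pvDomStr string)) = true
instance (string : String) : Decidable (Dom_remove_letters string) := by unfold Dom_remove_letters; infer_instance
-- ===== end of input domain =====

-- B replaces A's index/while-loop with sign-slicing plus a first-non-digit index and one slice (idiomatic; return value only).

-- ===== PORT A =====
-- A's while-loop: append string[i] while it is a digit.
def pvLoopA (cs : List Char) (acc : List Char) : List Char :=
  match cs with
  | [] => acc
  | c :: rest => if PySem.Chars.isdigit c then pvLoopA rest (acc ++ [c]) else acc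

def remove_letters (string : String) : String :=
  let l := string.toList
  match l with
  | [] => ""
  | c :: rest =>
    if c = '+' ∨ c = '-' then String.ofList (pvLoopA rest [c])
    else String.ofList (pvLoopA l [])

-- ===== PORT B =====
def remove_letters_alt (string : String) : String :=
  let l := string.toList
  -- sign = string[:1] if string[:1] in ('+','-') else ''
  let sign : List Char := match l with
    | c :: _ => if c = '+' ∨ c = '-' then [c] else []
    | [] => []
  let rest := l.drop sign.length
  -- cut = next((i for i, c in enumerate(rest) if not c.isdigit()), len(rest))
  let cut := (rest.findIdx? (fun c => !PySem.Chars.isdigit c)).getD rest.length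
  String.ofList (sign ++ rest.take cut)

-- ===== PRECONDITION & SPEC =====
def Spec_remove_letters (string : String) (out : String) : Prop := out = remove_letters_alt string
instance (string : String) (out : String) : Decidable (Spec_remove_letters string out) := by unfold Spec_remove_letters; infer_instance

-- ===== CLAIM =====
def Claim_equal_remove_letters : Prop := ∀ (string : String), Dom_remove_letters string → Spec_remove_letters string (remove_letters string)

-- ===== LEMMAS AND PROOFS =====
theorem pvLoopA_eq (cs : List Char) (acc : List Char) :
    pvLoopA cs acc = acc ++ cs.takeWhile PySem.Chars.isdigit := by
  induction cs generalizing acc with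
  | nil => simp [pvLoopA]
  | cons c rest ih =>
    by_cases h : PySem.Chars.isdigit c = true
    · simp [pvLoopA, h, ih]
    · simp [pvLoopA, h]

theorem pvCut_eq (p : Char → Bool) (cs : List Char) :
    cs.take ((cs.findIdx? (fun c => !p c)).getD cs.length) = cs.takeWhile p := by
  induction cs with
  | nil => simp
  | cons c rest ih =>
    by_cases h : p c = true
    · rw [List.findIdx?_cons]
      simp only [h, Bool.not_true, Bool.false_eq_true, if_false]
      rw [show ((rest.findIdx? (fun x => !p x)).map (· + 1)).getD (c :: rest).length
            = (rest.findIdx? (fun x => !p x)).getD rest.length + 1 by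
        cases rest.findIdx? (fun x => !p x) <;> simp]
      simp [h, ← ih]
    · rw [List.findIdx?_cons]
      simp [h]

theorem main_eq (string : String) : remove_letters string = remove_letters_alt string := by
  unfold remove_letters remove_letters_alt
  cases l : string.toList with
  | nil => rfl
  | cons c rest =>
    by_cases h : c = '+' ∨ c = '-'
    · simp only [h, if_pos]
      rw [pvLoopA_eq, pvCut_eq]
      simp
    · simp only [h, if_neg, not_false_iff]
      rw [pvLoopA_eq, pvCut_eq]
      simp

-- ===== VERDICT =====
theorem remove_letters_spec : Claim_equal_remove_letters := by
  intro s _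
  exact main_eq s
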